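-- pv_equiv track=rewrite | github.com/rajlath/rkl_codes | code-signal/combs.py | combs
-- ===== SOURCE A (Python) =====
-- def combs(comb1, comb2):
--     best = len(comb1) + len(comb2)
--     for i in range(-len(comb2), len(comb1) + 1):
--          fits = True
--          for j in range(len(comb2)):
--              k = i + j
--              if k >= 0 and k < len(comb1) and comb1[k] == "*" and comb2[j] == "*":
--                  fits = False
--          if not fits: continue;
--          width = max(len(comb1), i + len(comb2)) - min(i, 0)
--          if width < best: best = width
--     return best
-- ===== SOURCE B (Python) =====
-- def combs(comb1, comb2):
--     n, m = len(comb1), len(comb2)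
--     stars1 = [p for p, c in enumerate(comb1) if c == "*"]
--     stars2 = [q for q, c in enumerate(comb2) if c == "*"]
--     forbidden = {p - q for p in stars1 for q in stars2}
--     best = n + m
--     for i in range(-m, n + 1):
--         if i not in forbidden:
--             w = max(n, i + m) - min(i, 0)
--             if w < best:
--                 best = w
--     return best
-- ===== Notes on version B (the rewrite author's own statement) =====
-- stated objective: faster
-- what changed: B precomputes the set of conflicting offsets as the pairwise differences of the two combs' star positions, so each offset is judged by one hash-set lookup and A's inner scan over comb2 disappears.
import Mathlib
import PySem

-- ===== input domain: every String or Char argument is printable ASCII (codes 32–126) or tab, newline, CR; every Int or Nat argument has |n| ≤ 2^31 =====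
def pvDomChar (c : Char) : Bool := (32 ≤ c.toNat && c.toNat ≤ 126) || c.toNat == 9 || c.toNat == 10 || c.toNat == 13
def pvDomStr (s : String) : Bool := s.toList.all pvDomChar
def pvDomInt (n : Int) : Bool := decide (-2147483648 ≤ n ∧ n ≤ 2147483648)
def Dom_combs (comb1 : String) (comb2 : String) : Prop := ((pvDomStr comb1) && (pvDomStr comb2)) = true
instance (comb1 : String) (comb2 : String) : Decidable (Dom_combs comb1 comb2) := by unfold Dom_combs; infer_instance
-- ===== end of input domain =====

-- B precomputes the set of conflicting offsets (pairwise differences of star positions), so each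
-- offset needs one set lookup instead of A's inner scan over comb2 (objective: faster).

-- ===== PORT A =====
-- literal transliteration of A: for each offset i, an inner loop over j sets fits := False on a
-- clash; Python's guarded comb1[k] access is exact here since the k-range guard precedes it.
def combs (comb1 : String) (comb2 : String) : Int :=
  let l1 := comb1.toList
  let l2 := comb2.toList
  let n : Int := l1.length
  let m : Int := l2.length
  (PySem.List.pyRange (-m) (n + 1) 1).foldl (fun best i =>
    let fits := (PySem.List.pyRange 0 m 1).foldl (fun fits j =>
      let k := i + j
      if k ≥ 0 ∧ k < n ∧ PySem.List.pyGet? l1 k = some '*' ∧ PySem.List.pyGet? l2 j = some '*'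
      then false else fits) true
    if !fits then best
    else
      let width := max n (i + m) - min i 0
      if width < best then width else best) (n + m)

-- ===== PORT B =====
-- Source B's star-position comprehension [p for p, c in enumerate(s) if c == "*"]
def pvStars (l : List Char) : List Int :=
  (PySem.List.enumerate l 0).filterMap (fun p => if p.2 = '*' then some p.1 else none)

def combs_alt (comb1 : String) (comb2 : String) : Int :=
  let l1 := comb1.toList
  let l2 := comb2.toList
  let n : Int := l1.length
  let m : Int := l2.length
  let stars1 := pvStars l1
  let stars2 := pvStars l2
  -- set comprehension {p - q for p in stars1 for q in stars2}
  let forbidden : PySem.Set Int :=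
    PySem.Set.ofList (stars1.flatMap (fun p => stars2.map (fun q => p - q)))
  (PySem.List.pyRange (-m) (n + 1) 1).foldl (fun (best : Int) (i : Int) =>
    if ¬ PySem.Set.contains forbidden i then
      let w := max n (i + m) - min i 0
      if w < best then w else best
    else best) (n + m)

-- ===== PRECONDITION & SPEC =====
def Spec_combs (comb1 : String) (comb2 : String) (out : Int) : Prop := out = combs_alt comb1 comb2
instance (comb1 : String) (comb2 : String) (out : Int) : Decidable (Spec_combs comb1 comb2 out) := by unfold Spec_combs; infer_instance

-- ===== CLAIM (what is proved, stated in full; the proofs are below) =====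
def Claim_equal_combs : Prop := ∀ (comb1 : String) (comb2 : String), Dom_combs comb1 comb2 → Spec_combs comb1 comb2 (combs comb1 comb2)

-- ===== LEMMAS AND PROOFS =====

-- membership in the star-position list
theorem mem_pvStars (l : List Char) (p : Int) :
    p ∈ pvStars l ↔ ∃ k : Nat, l[k]? = some '*' ∧ p = (k : Int) := by
  unfold pvStars
  rw [List.mem_filterMap]
  constructor
  · rintro ⟨x, hx, hif⟩
    obtain ⟨k, hk, rfl⟩ := (PySem.List.mem_enumerate_iff ..).mp hx
    by_cases hstar : l[k] = '*'
    · exact ⟨k, by simp [hk, hstar], by simp [hstar] at hif; omega⟩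
    · simp [hstar] at hif
  · rintro ⟨k, hstar, rfl⟩
    obtain ⟨hk, he⟩ := List.getElem?_eq_some_iff.mp hstar
    exact ⟨((k : Int), l[k]), (PySem.List.mem_enumerate_iff ..).mpr ⟨k, hk, by simp⟩,
      by simp [he]⟩

-- A's inner loop: the fits flag is the conjunction of the negated clash conditions
theorem foldl_iffalse {α : Type} (P : α → Prop) [DecidablePred P] (l : List α) (b : Bool) :
    l.foldl (fun acc j => if P j then false else acc) b = (b && l.all (fun j => !decide (P j))) := by
  induction l generalizing b with
  | nil => simp
  | cons x xs ih =>
    rw [List.foldl_cons, List.all_cons, ih]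
    by_cases h : P x <;> simp [h]

-- per-offset agreement: A's inner scan finds a clash iff i is a star-position difference
theorem fits_eq (l1 l2 : List Char) (i : Int) :
    ((PySem.List.pyRange 0 (l2.length : Int) 1).foldl (fun fits j =>
        if i + j ≥ 0 ∧ i + j < (l1.length : Int) ∧ PySem.List.pyGet? l1 (i + j) = some '*' ∧
           PySem.List.pyGet? l2 j = some '*'
        then false else fits) true)
    = !(PySem.Set.contains
        (PySem.Set.ofList ((pvStars l1).flatMap (fun p => (pvStars l2).map (fun q => p - q)))) i) := by
  rw [foldl_iffalse]
  rw [Bool.eq_iff_iff]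
  simp only [Bool.true_and, List.all_eq_true, PySem.List.mem_pyRange_one,
    Bool.not_eq_eq_eq_not, Bool.not_true, decide_eq_false_iff_not,
    PySem.Set.contains, PySem.Set.mem_ofList, List.contains_eq_mem, decide_eq_false_iff_not,
    List.mem_flatMap, List.mem_map, mem_pvStars]
  constructor
  · rintro h ⟨p, ⟨a, hsa, hpa⟩, q, ⟨b, hsb, hqb⟩, hi⟩
    have hal : a < l1.length := (List.getElem?_eq_some_iff.mp hsa).1
    have hbl : b < l2.length := (List.getElem?_eq_some_iff.mp hsb).1
    refine h q ⟨by omega, by omega⟩ ⟨by omega, by omega, ?_, ?_⟩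
    · have : i + q = ((a : Nat) : Int) := by omega
      rw [this, PySem.List.pyGet?_natCast]
      exact hsa
    · have : q = ((b : Nat) : Int) := hqb
      rw [this, PySem.List.pyGet?_natCast]
      exact hsb
  · intro h j hj hP
    obtain ⟨hk0, hkn, hg1, hg2⟩ := hP
    apply h
    rw [PySem.List.pyGet?_of_nonneg _ (by omega)] at hg1
    rw [PySem.List.pyGet?_of_nonneg _ (by omega)] at hg2
    refine ⟨i + j, ⟨(i + j).toNat, hg1, by omega⟩, j, ⟨j.toNat, hg2, by omega⟩, by ring⟩

-- ===== VERDICT (by name: the statement is the Claim_ definition above) =====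
theorem combs_spec : Claim_equal_combs := by
  intro comb1 comb2 _
  unfold Spec_combs combs combs_alt
  simp only []
  congr 1
  funext best i
  rw [fits_eq]
  cases hc : PySem.Set.contains
      (PySem.Set.ofList ((pvStars comb1.toList).flatMap
        (fun p => (pvStars comb2.toList).map (fun q => p - q)))) i <;>
    simp only [Bool.not_true, Bool.not_false, not_true, not_false_iff,
      Bool.false_eq_true, if_true, if_false]
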